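-- pv_equiv track=rewrite | github.com/takumi-13/baby | human_function.py | extract_joints
-- ===== SOURCE A (Python) =====
-- def extract_joints (l) :
--     length = len(l)
--     res = []
--     for i in range (length):
--         if i % 3 == 0:
--             x = l[i]
--         if i % 3 == 1:
--             y = l[i]
--         if i % 3 == 2:
--             per = l[i]
--             res.append([x,y,per])
--     return res
-- ===== SOURCE B (Python) =====
-- def extract_joints(l):
--     # idiomatic: consume one iterator three at a time; drops any incomplete tail
--     return [list(t) for t in zip(*[iter(l)] * 3)]
-- ===== Notes on version B (the rewrite author's own statement) =====
-- stated objective: idiomatic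
-- what changed: Replaces the per-element index loop with modulo branches and carried x/y state by a grouped pass (zip over one shared iterator) that forms each triplet directly in n/3 iterations.
import Mathlib
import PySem

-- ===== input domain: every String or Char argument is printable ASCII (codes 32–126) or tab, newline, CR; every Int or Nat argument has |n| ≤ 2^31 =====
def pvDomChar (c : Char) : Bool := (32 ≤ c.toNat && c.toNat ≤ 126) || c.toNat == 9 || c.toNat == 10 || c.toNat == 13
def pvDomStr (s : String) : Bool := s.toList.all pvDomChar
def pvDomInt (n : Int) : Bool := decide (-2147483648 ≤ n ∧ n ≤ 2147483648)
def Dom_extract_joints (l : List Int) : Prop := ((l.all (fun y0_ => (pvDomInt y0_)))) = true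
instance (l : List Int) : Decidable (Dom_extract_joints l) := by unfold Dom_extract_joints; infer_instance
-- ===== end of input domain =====

-- ===== PORT A =====
-- loop state (x, y, res); x/y start at 0 but are never read before being set
-- (the first append happens at i = 2, after i = 0 set x and i = 1 set y)
def extract_joints (l : List Int) : List (List Int) :=
  ((PySem.List.pyRange 0 (l.length : Int) 1).foldl
    (fun (st : Int × Int × List (List Int)) i =>
      let x := if i % 3 = 0 then PySem.List.pyGetD l i 0 else st.1
      let y := if i % 3 = 1 then PySem.List.pyGetD l i 0 else st.2.1
      let res := if i % 3 = 2 then st.2.2 ++ [[x, y, PySem.List.pyGetD l i 0]] else st.2.2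
      (x, y, res))
    (0, 0, [])).2.2

-- ===== PORT B =====
-- B consumes the list three elements at a time, dropping an incomplete tail
def extract_joints_alt : List Int → List (List Int)
  | x :: y :: p :: rest => [x, y, p] :: extract_joints_alt rest
  | _ => []

-- ===== PRECONDITION & SPEC =====
def Spec_extract_joints (l : List Int) (out : List (List Int)) : Prop := out = extract_joints_alt l
instance (l : List Int) (out : List (List Int)) : Decidable (Spec_extract_joints l out) := by unfold Spec_extract_joints; infer_instance

-- ===== CLAIM (what is proved, stated in full; the proofs are below) =====
def Claim_equal_extract_joints : Prop := ∀ (l : List Int), Dom_extract_joints l → Spec_extract_joints l (extract_joints l)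

-- ===== LEMMAS AND PROOFS =====

def pvStep (l : List Int) (st : Int × Int × List (List Int)) (i : Int) :
    Int × Int × List (List Int) :=
  let x := if i % 3 = 0 then PySem.List.pyGetD l i 0 else st.1
  let y := if i % 3 = 1 then PySem.List.pyGetD l i 0 else st.2.1
  let res := if i % 3 = 2 then st.2.2 ++ [[x, y, PySem.List.pyGetD l i 0]] else st.2.2
  (x, y, res)

lemma pvStep_mod0 (L : List Int) (st : Int × Int × List (List Int)) (i : Int)
    (h : i % 3 = 0) : pvStep L st i = (PySem.List.pyGetD L i 0, st.2.1, st.2.2) := by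
  simp only [pvStep, h]; norm_num

lemma pvStep_mod1 (L : List Int) (st : Int × Int × List (List Int)) (i : Int)
    (h : i % 3 = 1) : pvStep L st i = (st.1, PySem.List.pyGetD L i 0, st.2.2) := by
  simp only [pvStep, h]; norm_num

lemma pvStep_mod2 (L : List Int) (st : Int × Int × List (List Int)) (i : Int)
    (h : i % 3 = 2) :
    pvStep L st i = (st.1, st.2.1, st.2.2 ++ [[st.1, st.2.1, PySem.List.pyGetD L i 0]]) := by
  simp only [pvStep, h]; norm_num

lemma pvGetD_append_right (pre t : List Int) (j : Nat) :
    PySem.List.pyGetD (pre ++ t) ((pre.length : Int) + (j : Int)) 0 = t.getD j 0 := by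
  have hc : ((pre.length : Int) + (j : Int)) = ((pre.length + j : Nat) : Int) := by push_cast; ring
  rw [hc, PySem.List.pyGetD_natCast]
  simp [List.getD_eq_getElem?_getD, List.getElem?_append_right (Nat.le_add_right _ _)]

lemma pvFold_chunk (t pre : List Int) (k : Nat) (hpre : pre.length = 3 * k)
    (x y : Int) (acc : List (List Int)) :
    ((PySem.List.pyRange ((3 * k : Nat) : Int) (((pre ++ t).length : Nat) : Int) 1).foldl
      (pvStep (pre ++ t)) (x, y, acc)).2.2 = acc ++ extract_joints_alt t := by
  induction t using extract_joints_alt.induct generalizing pre k x y acc with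
  | case1 a b c rest ih =>
    have h0 : ((3 * k : Nat) : Int) < ((pre ++ (a :: b :: c :: rest)).length : Int) := by
      simp [hpre] <;> omega
    have h1 : ((3 * k : Nat) : Int) + 1 < ((pre ++ (a :: b :: c :: rest)).length : Int) := by
      simp [hpre] <;> omega
    have h2 : ((3 * k : Nat) : Int) + 1 + 1 < ((pre ++ (a :: b :: c :: rest)).length : Int) := by
      simp [hpre] <;> omega
    rw [PySem.List.pyRange_one_cons h0, PySem.List.pyRange_one_cons h1,
        PySem.List.pyRange_one_cons h2]
    simp only [List.foldl_cons]
    have m0 : ((3 * k : Nat) : Int) % 3 = 0 := by omega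
    have m1 : (((3 * k : Nat) : Int) + 1) % 3 = 1 := by omega
    have m2 : (((3 * k : Nat) : Int) + 1 + 1) % 3 = 2 := by omega
    rw [pvStep_mod0 _ _ _ m0, pvStep_mod1 _ _ _ m1, pvStep_mod2 _ _ _ m2]
    have g0 : PySem.List.pyGetD (pre ++ (a :: b :: c :: rest)) ((3 * k : Nat) : Int) 0 = a := by
      have := pvGetD_append_right pre (a :: b :: c :: rest) 0
      simpa [hpre] using this
    have g1 : PySem.List.pyGetD (pre ++ (a :: b :: c :: rest)) (((3 * k : Nat) : Int) + 1) 0 = b := by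
      have := pvGetD_append_right pre (a :: b :: c :: rest) 1
      simpa [hpre] using this
    have g2 : PySem.List.pyGetD (pre ++ (a :: b :: c :: rest)) (((3 * k : Nat) : Int) + 1 + 1) 0 = c := by
      have := pvGetD_append_right pre (a :: b :: c :: rest) 2
      simpa [hpre, add_assoc] using this
    simp only [g0, g1, g2]
    have hre : pre ++ (a :: b :: c :: rest) = (pre ++ [a, b, c]) ++ rest := by simp
    have hlen2 : (pre ++ [a, b, c]).length = 3 * (k + 1) := by simp [hpre] <;> omega
    have hstart : ((3 * k : Nat) : Int) + 1 + 1 + 1 = ((3 * (k + 1) : Nat) : Int) := by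
      push_cast; ring
    rw [hre, hstart, ih (pre ++ [a, b, c]) (k + 1) hlen2 a b (acc ++ [[a, b, c]])]
    simp [extract_joints_alt]
  | case2 t h =>
    have key : ∀ (t' : List Int), t'.length < 3 → ∀ (pre : List Int) (k : Nat),
        pre.length = 3 * k → ∀ (x y : Int) (acc : List (List Int)),
        ((PySem.List.pyRange ((3 * k : Nat) : Int) (((pre ++ t').length : Nat) : Int) 1).foldl
          (pvStep (pre ++ t')) (x, y, acc)).2.2 = acc := by
      intro t' ht' pre k hpre x y acc
      rcases t' with _ | ⟨a, _ | ⟨b, _ | ⟨c, r⟩⟩⟩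
      · rw [PySem.List.pyRange_one_eq_nil (by simp [hpre])]
        simp
      · have h0 : ((3 * k : Nat) : Int) < ((pre ++ [a]).length : Int) := by
          simp [hpre]
        rw [PySem.List.pyRange_one_cons h0,
            PySem.List.pyRange_one_eq_nil (by simp [hpre])]
        simp only [List.foldl_cons, List.foldl_nil,
          pvStep_mod0 _ _ _ (by omega : ((3 * k : Nat) : Int) % 3 = 0)]
      · have h0 : ((3 * k : Nat) : Int) < ((pre ++ [a, b]).length : Int) := by
          simp [hpre]
        have h1 : ((3 * k : Nat) : Int) + 1 < ((pre ++ [a, b]).length : Int) := by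
          simp [hpre]
        rw [PySem.List.pyRange_one_cons h0, PySem.List.pyRange_one_cons h1,
            PySem.List.pyRange_one_eq_nil (by simp [hpre] <;> omega)]
        simp only [List.foldl_cons, List.foldl_nil,
          pvStep_mod0 _ _ _ (by omega : ((3 * k : Nat) : Int) % 3 = 0),
          pvStep_mod1 _ _ _ (by omega : (((3 * k : Nat) : Int) + 1) % 3 = 1)]
      · exact absurd ht' (by simp)
    rcases t with _ | ⟨a, _ | ⟨b, _ | ⟨c, r⟩⟩⟩
    · rw [key [] (by simp) pre k hpre x y acc]; simp [extract_joints_alt]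
    · rw [key [a] (by simp) pre k hpre x y acc]; simp [extract_joints_alt]
    · rw [key [a, b] (by simp) pre k hpre x y acc]; simp [extract_joints_alt]
    · exact absurd rfl (h a b c r)

-- ===== VERDICT (by name: the statement is the Claim_ definition above) =====
theorem extract_joints_spec : Claim_equal_extract_joints := by
  intro l _
  show extract_joints l = extract_joints_alt l
  have h : extract_joints l
      = ((PySem.List.pyRange 0 (l.length : Int) 1).foldl (pvStep l) (0, 0, [])).2.2 := rfl
  rw [h]
  have := pvFold_chunk l [] 0 rfl 0 0 []
  simpa using this
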